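-- pv_equiv track=rewrite | github.com/drorb1987/echo-adl | monthly_adl.py | get_total_status
-- ===== SOURCE A (Python) =====
-- GREEN = 0
--
-- YELLOW = 1
--
-- YELLOW_UP = 2
--
-- YELLOW_DOWN = 3
--
-- RED = 4
--
-- RED_UP = 5
--
-- RED_DOWN = 6
--
-- GRAY = 7
--
-- def get_total_status(d: dict) -> int:
--     """Get total status for the measurement
--
--     Args:
--         d (dict): a dictionary of all the stats of the measurement
--
--     Returns:
--         int: the color to indicate the status of the measurement
--     """
--     statuses = [d[key] for key in d]
--     status = GREEN
--     if all(s == GRAY for s in statuses):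
--         status = GRAY
--     elif RED in statuses or RED_UP in statuses or RED_DOWN in statuses:
--         status = RED
--     elif YELLOW in statuses or YELLOW_DOWN in statuses or YELLOW_UP in statuses:
--         status = YELLOW
--     # casting status to integer for writing the value to the api with the correct type
--     return int(status)
-- ===== SOURCE B (Python) =====
-- GREEN = 0
-- YELLOW = 1
-- YELLOW_UP = 2
-- YELLOW_DOWN = 3
-- RED = 4
-- RED_UP = 5
-- RED_DOWN = 6
-- GRAY = 7
--
-- def get_total_status(d: dict) -> int:
--     """Single pass over the values accumulating three flags, then decide."""
--     all_gray = True
--     has_red = False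
--     has_yellow = False
--     for s in d.values():
--         if s != GRAY:
--             all_gray = False
--         if s in (RED, RED_UP, RED_DOWN):
--             has_red = True
--         elif s in (YELLOW, YELLOW_UP, YELLOW_DOWN):
--             has_yellow = True
--     if all_gray:
--         return GRAY
--     if has_red:
--         return RED
--     if has_yellow:
--         return YELLOW
--     return GREEN
-- ===== Notes on version B (the rewrite author's own statement) =====
-- stated objective: alternative
-- what changed: A builds the values list and scans it up to seven times (one all() pass plus six membership tests); B makes a single pass over d.values() accumulating three boolean flags and decides from them afterwards.
import Mathlib
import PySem

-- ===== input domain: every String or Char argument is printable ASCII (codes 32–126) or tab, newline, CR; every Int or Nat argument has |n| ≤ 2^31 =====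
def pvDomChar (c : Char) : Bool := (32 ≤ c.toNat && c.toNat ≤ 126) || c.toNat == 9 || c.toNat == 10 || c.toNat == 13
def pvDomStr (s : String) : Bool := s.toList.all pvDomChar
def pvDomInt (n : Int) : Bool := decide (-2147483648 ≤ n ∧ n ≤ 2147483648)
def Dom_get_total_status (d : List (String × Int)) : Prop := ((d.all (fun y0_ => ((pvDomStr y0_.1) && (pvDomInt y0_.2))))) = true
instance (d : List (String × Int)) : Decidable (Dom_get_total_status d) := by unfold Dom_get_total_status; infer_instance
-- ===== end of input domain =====

-- B replaces A's values list plus up-to-seven scans by one pass accumulating three flags (alternative decomposition, same cost).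

-- ===== PORT A =====
-- statuses = [d[key] for key in d]; then all()-scan and six membership tests, in A's branch order.
def get_total_status (d : List (String × Int)) : Int :=
  let statuses := (PySem.Dict.ofList d).values
  let status : Int := 0
  let status :=
    if statuses.all (fun s => s == 7) then (7 : Int)
    else if statuses.contains 4 || statuses.contains 5 || statuses.contains 6 then (4 : Int)
    else if statuses.contains 1 || statuses.contains 3 || statuses.contains 2 then (1 : Int)
    else status
  status

-- ===== PORT B =====
-- one loop iteration of Source B: update (all_gray, has_red, has_yellow) for one value s
def bStep (acc : Bool × Bool × Bool) (s : Int) : Bool × Bool × Bool :=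
  let all_gray := if s != 7 then false else acc.1
  if s == 4 || s == 5 || s == 6 then (all_gray, true, acc.2.2)
  else if s == 1 || s == 2 || s == 3 then (all_gray, acc.2.1, true)
  else (all_gray, acc.2.1, acc.2.2)

def get_total_status_alt (d : List (String × Int)) : Int :=
  let st := (PySem.Dict.ofList d).values.foldl bStep (true, false, false)
  if st.1 then (7 : Int)
  else if st.2.1 then (4 : Int)
  else if st.2.2 then (1 : Int)
  else (0 : Int)

-- ===== PRECONDITION & SPEC =====
def Spec_get_total_status (d : List (String × Int)) (out : Int) : Prop := out = get_total_status_alt d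
instance (d : List (String × Int)) (out : Int) : Decidable (Spec_get_total_status d out) := by unfold Spec_get_total_status; infer_instance

-- ===== CLAIM (what is proved, stated in full; the proofs are below) =====
def Claim_equal_get_total_status : Prop := ∀ (d : List (String × Int)), Dom_get_total_status d → Spec_get_total_status d (get_total_status d)

-- ===== LEMMAS AND PROOFS =====

theorem bStep_eq (acc : Bool × Bool × Bool) (s : Int) :
    bStep acc s = (acc.1 && (s == 7), acc.2.1 || (s == 4 || s == 5 || s == 6),
                   acc.2.2 || (s == 1 || s == 2 || s == 3)) := by
  unfold bStep
  by_cases h7 : s = 7 <;> by_cases h4 : s = 4 <;> by_cases h5 : s = 5 <;>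
    by_cases h6 : s = 6 <;> by_cases h1 : s = 1 <;> by_cases h2 : s = 2 <;>
    by_cases h3 : s = 3 <;> simp_all [Prod.ext_iff]

theorem foldl_bStep (l : List Int) (ag hr hy : Bool) :
    l.foldl bStep (ag, hr, hy) =
      (ag && l.all (fun s => s == 7),
       hr || l.any (fun s => s == 4 || s == 5 || s == 6),
       hy || l.any (fun s => s == 1 || s == 2 || s == 3)) := by
  induction l generalizing ag hr hy with
  | nil => simp
  | cons s t ih =>
    simp only [List.foldl_cons, bStep_eq, ih, List.all_cons, List.any_cons,
      Bool.and_assoc, Bool.or_assoc]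

theorem any_red (l : List Int) :
    l.any (fun s => s == 4 || s == 5 || s == 6) =
      (l.contains 4 || l.contains 5 || l.contains 6) := by
  rw [Bool.eq_iff_iff]
  simp only [List.any_eq_true, List.contains_iff_mem, Bool.or_eq_true, beq_iff_eq]
  constructor
  · rintro ⟨x, hx, h⟩
    rcases h with (h | h) | h <;> subst h <;> simp_all
  · rintro ((h | h) | h) <;> exact ⟨_, h, by simp⟩

theorem any_yellow (l : List Int) :
    l.any (fun s => s == 1 || s == 2 || s == 3) =
      (l.contains 1 || l.contains 3 || l.contains 2) := by
  rw [Bool.eq_iff_iff]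
  simp only [List.any_eq_true, List.contains_iff_mem, Bool.or_eq_true, beq_iff_eq]
  constructor
  · rintro ⟨x, hx, h⟩
    rcases h with (h | h) | h <;> subst h <;> simp_all
  · rintro ((h | h) | h) <;> exact ⟨_, h, by simp⟩

-- ===== VERDICT (by name: the statement is the Claim_ definition above) =====
theorem get_total_status_spec : Claim_equal_get_total_status := by
  intro d _
  unfold Spec_get_total_status get_total_status get_total_status_alt
  simp only [foldl_bStep, Bool.true_and, Bool.false_or, any_red, any_yellow]
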